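-- pv_equiv track=rewrite | github.com/TorresOwO/mkv-audio-sync | smart_synchronize.py | create_segments_from_silences
-- ===== SOURCE A (Python) =====
-- def create_segments_from_silences(audio_length, silence_intervals):
--     """
--     Creates non-silent segments between silence intervals.
--     Returns list of (start_sample, end_sample) for audio segments.
--     """
--     if len(silence_intervals) == 0:
--         return [(0, audio_length)]
--
--     segments = []
--     current_pos = 0
--
--     for silence_start, silence_end, _ in silence_intervals:
--         # Add segment before this silence
--         if current_pos < silence_start:
--             segments.append((current_pos, silence_start))
--         current_pos = silence_end
--
--     # Add final segment after last silence
--     if current_pos < audio_length: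
--         segments.append((current_pos, audio_length))
--
--     return segments
-- ===== SOURCE B (Python) =====
-- def create_segments_from_silences(audio_length, silence_intervals):
--     """
--     Creates non-silent segments between silence intervals.
--     Boundary-table decomposition: flatten all interval endpoints into one
--     ordered point list, pair up alternate positions, keep non-degenerate pairs.
--     """
--     if len(silence_intervals) == 0:
--         return [(0, audio_length)]
--     pts = [0]
--     for silence_start, silence_end, _ in silence_intervals:
--         pts.append(silence_start)
--         pts.append(silence_end)
--     pts.append(audio_length)
--     return [(a, b) for a, b in zip(pts[::2], pts[1::2]) if a < b]
-- ===== Notes on version B (the rewrite author's own statement) =====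
-- stated objective: alternative
-- what changed: Replaces the running-cursor scan with a boundary-table decomposition: flatten 0, all interval endpoints and audio_length into one point list, pair alternate positions with zip, and keep pairs with start < end.
import Mathlib
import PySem

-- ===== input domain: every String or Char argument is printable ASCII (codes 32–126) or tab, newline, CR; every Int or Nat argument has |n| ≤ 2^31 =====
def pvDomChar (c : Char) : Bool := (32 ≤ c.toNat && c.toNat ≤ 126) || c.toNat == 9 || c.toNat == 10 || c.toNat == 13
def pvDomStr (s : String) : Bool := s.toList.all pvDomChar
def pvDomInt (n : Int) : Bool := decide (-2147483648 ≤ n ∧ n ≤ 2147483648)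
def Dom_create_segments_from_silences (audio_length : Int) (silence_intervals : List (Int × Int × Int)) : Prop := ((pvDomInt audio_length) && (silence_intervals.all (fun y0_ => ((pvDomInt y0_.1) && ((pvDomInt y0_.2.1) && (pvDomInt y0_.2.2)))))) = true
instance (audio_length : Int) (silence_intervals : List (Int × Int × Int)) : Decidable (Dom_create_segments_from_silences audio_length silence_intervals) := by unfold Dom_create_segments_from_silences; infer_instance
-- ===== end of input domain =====

-- B changes the decomposition (boundary table + alternate-position pairing instead of a running-cursor scan); same cost, proved equal on all inputs.

-- ===== PORT A =====
def create_segments_from_silences (audio_length : Int) (silence_intervals : List (Int × Int × Int)) : List (Int × Int) :=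
  if silence_intervals.length == 0 then [(0, audio_length)]
  else
    let st := silence_intervals.foldl
      (fun (acc : List (Int × Int) × Int) (t : Int × Int × Int) =>
        (if acc.2 < t.1 then acc.1 ++ [(acc.2, t.1)] else acc.1, t.2.1))
      ([], 0)
    if st.2 < audio_length then st.1 ++ [(st.2, audio_length)] else st.1

-- ===== PORT B =====
-- hand port of Python's step-2 slices pts[::2] / pts[1::2] (exact: takes every other element)
def pvEveryOther : List Int → List Int
  | [] => []
  | [x] => [x]
  | x :: _ :: rest => x :: pvEveryOther rest

def create_segments_from_silences_alt (audio_length : Int) (silence_intervals : List (Int × Int × Int)) : List (Int × Int) :=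
  if silence_intervals.length == 0 then [(0, audio_length)]
  else
    let pts := ([0] : List Int) ++
      silence_intervals.foldl (fun acc (t : Int × Int × Int) => acc ++ [t.1, t.2.1]) [] ++
      [audio_length]
    ((pvEveryOther pts).zip (pvEveryOther (pts.drop 1))).filter (fun p => p.1 < p.2)

-- ===== PRECONDITION & SPEC =====
def Spec_create_segments_from_silences (audio_length : Int) (silence_intervals : List (Int × Int × Int)) (out : List (Int × Int)) : Prop := out = create_segments_from_silences_alt audio_length silence_intervals
instance (audio_length : Int) (silence_intervals : List (Int × Int × Int)) (out : List (Int × Int)) : Decidable (Spec_create_segments_from_silences audio_length silence_intervals out) := by unfold Spec_create_segments_from_silences; infer_instance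

-- ===== CLAIM (what is proved, stated in full; the proofs are below) =====
def Claim_equal_create_segments_from_silences : Prop := ∀ (audio_length : Int) (silence_intervals : List (Int × Int × Int)), Dom_create_segments_from_silences audio_length silence_intervals → Spec_create_segments_from_silences audio_length silence_intervals (create_segments_from_silences audio_length silence_intervals)

-- ===== LEMMAS AND PROOFS =====

-- common characterisation: the candidate gaps from cursor c through ints, ending at L
def pvGaps (L : Int) (c : Int) : List (Int × Int × Int) → List (Int × Int)
  | [] => if c < L then [(c, L)] else []
  | t :: rest => (if c < t.1 then [(c, t.1)] else []) ++ pvGaps L t.2.1 rest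

theorem pvA_fold_eq (L : Int) : ∀ (ints : List (Int × Int × Int)) (segs : List (Int × Int)) (c : Int),
    (if (ints.foldl
      (fun (acc : List (Int × Int) × Int) (t : Int × Int × Int) =>
        (if acc.2 < t.1 then acc.1 ++ [(acc.2, t.1)] else acc.1, t.2.1)) (segs, c)).2 < L then
      (ints.foldl
      (fun (acc : List (Int × Int) × Int) (t : Int × Int × Int) =>
        (if acc.2 < t.1 then acc.1 ++ [(acc.2, t.1)] else acc.1, t.2.1)) (segs, c)).1 ++
        [((ints.foldl
      (fun (acc : List (Int × Int) × Int) (t : Int × Int × Int) =>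
        (if acc.2 < t.1 then acc.1 ++ [(acc.2, t.1)] else acc.1, t.2.1)) (segs, c)).2, L)]
     else (ints.foldl
      (fun (acc : List (Int × Int) × Int) (t : Int × Int × Int) =>
        (if acc.2 < t.1 then acc.1 ++ [(acc.2, t.1)] else acc.1, t.2.1)) (segs, c)).1)
    = segs ++ pvGaps L c ints := by
  intro ints
  induction ints with
  | nil => intro segs c; simp [pvGaps]; split <;> simp
  | cons t rest ih =>
    intro segs c
    simp only [List.foldl_cons, pvGaps]
    rw [ih]
    split <;> simp

theorem pvB_body_eq (L : Int) : ∀ (ints : List (Int × Int × Int)) (c : Int),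
    ((pvEveryOther (c :: (ints.flatMap (fun t => [t.1, t.2.1]) ++ [L]))).zip
      (pvEveryOther (ints.flatMap (fun t => [t.1, t.2.1]) ++ [L]))).filter
      (fun p => p.1 < p.2) = pvGaps L c ints := by
  intro ints
  induction ints with
  | nil =>
    intro c
    simp [pvEveryOther, pvGaps, List.zip, List.filter]
    split <;> simp_all
  | cons t rest ih =>
    intro c
    simp only [List.flatMap_cons, List.append_assoc, List.cons_append, List.nil_append,
      pvEveryOther, List.zip_cons_cons, List.filter_cons, pvGaps]
    rw [ih]
    split <;> simp_all

theorem pvB_flatten (ints : List (Int × Int × Int)) :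
    ints.foldl (fun acc (t : Int × Int × Int) => acc ++ [t.1, t.2.1]) [] =
      ints.flatMap (fun t => [t.1, t.2.1]) := by
  have h : ∀ (l : List (Int × Int × Int)) (acc : List Int),
      l.foldl (fun acc (t : Int × Int × Int) => acc ++ [t.1, t.2.1]) acc =
        acc ++ l.flatMap (fun t => [t.1, t.2.1]) := by
    intro l
    induction l with
    | nil => simp
    | cons t rest ih => intro acc; simp [ih]
  simpa using h ints []

-- ===== VERDICT (by name: the statement is the Claim_ definition above) =====
theorem create_segments_from_silences_spec : Claim_equal_create_segments_from_silences := by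
  intro L ints _
  unfold Spec_create_segments_from_silences create_segments_from_silences create_segments_from_silences_alt
  by_cases h : ints.length == 0
  · simp [h]
  · simp only [h, if_neg, Bool.false_eq_true, ite_false]
    rw [pvB_flatten]
    simp only [List.singleton_append, List.cons_append, List.nil_append]
    rw [show List.drop 1 ((0:Int) :: (List.flatMap (fun t => [t.1, t.2.1]) ints ++ [L])) =
      List.flatMap (fun (t : Int × Int × Int) => [t.1, t.2.1]) ints ++ [L] from rfl]
    rw [pvB_body_eq, pvA_fold_eq]
    simp
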